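-- pv_equiv track=rewrite | github.com/accehikllmr/Python | beginner/concepts/loops_or_collections/vehicle_wheels_2_refactored.py | count_wheels
-- ===== SOURCE A (Python) =====
-- def count_wheels(num_bicycles: int, num_tricycles: int, num_cars: int, num_trucks: int) -> int:
--     """
--     Given a number of bicycles, tricycles, car and trucks, the total number of wheels is calculated.
--
--     Parameters:
--         num_bicycles (int): quantity of bicycles
--         num_tricycles (int): quantity of tricycles
--         num_cars (int): quantity of cars
--         num_trucks (int): quantity of trucks
--
--     Returns:
--         (int): total wheels for all vehicles combined
--
--     >>> count_wheels(0, 0, 0, 0)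
--     0
--     >>> count_wheels(10, 1, 3, 2)
--     71
--     >>> count_wheels(-1, 1, 3, 2)
--     Traceback (most recent call last):
--     ...
--     AssertionError: argument passed to num_bicycles parameter must be a non-negative integer
--     >>> count_wheels('1', 1, 3, 2)
--     Traceback (most recent call last):
--     ...
--     AssertionError: argument passed to num_bicycles parameter must be a non-negative integer
--     """
--
--     # use isinstance rather than type, latter is bad form, also combining assertions to make more concise
--     assert isinstance(num_bicycles, int) and num_bicycles >= 0, "argument passed to num_bicycles parameter must be a non-negative integer"
--     assert isinstance(num_tricycles, int) and num_tricycles >= 0, "argument passed to num_tricycles parameter must be a non-negative integer"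
--     assert isinstance(num_cars, int) and num_cars >= 0, "argument passed to num_cars parameter must be a non-negative integer"
--     assert isinstance(num_trucks, int) and num_trucks >= 0, "argument passed to num_trucks parameter must be a non-negative integer"
--
--     # dictionary object to contain attributes of each vehicle type (but OOP would probably be better here)
--     vehicles = {
--         'bicycle': {
--             'wheels': 2,
--             'quantity': num_bicycles
--         },
--         'tricycle': {
--             'wheels': 3,
--             'quantity': num_tricycles
--         },
--         'car': {
--             'wheels': 4,
--             'quantity': num_cars
--         },
--         'truck': {
--             'wheels': 18,
--             'quantity': num_trucks
--         }
--     }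
--
--     # to count total wheels
--     total_wheels = 0
--
--     # iterating through outer dictionary keys
--     for vehicle in vehicles.keys():
--         # set to 1, since each iteration multiplies the value (instantiating it at 0 keeps it as 0)
--         wheels = 1
--         # iterating through inner dictionary keys, but need to specify temporary variable for outer key to access inner keys
--         for attribute in vehicles[vehicle].keys():
--             # calculate wheels for single vehicle
--             wheels *= vehicles[vehicle][attribute]
--         total_wheels += wheels
--
--     # above is not as concise as previous approach, but it helps better understand how to manipulate dictionaries
--
--     return total_wheels
-- ===== SOURCE B (Python) =====
-- def count_wheels(num_bicycles: int, num_tricycles: int, num_cars: int, num_trucks: int) -> int: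
--     assert isinstance(num_bicycles, int) and num_bicycles >= 0, "argument passed to num_bicycles parameter must be a non-negative integer"
--     assert isinstance(num_tricycles, int) and num_tricycles >= 0, "argument passed to num_tricycles parameter must be a non-negative integer"
--     assert isinstance(num_cars, int) and num_cars >= 0, "argument passed to num_cars parameter must be a non-negative integer"
--     assert isinstance(num_trucks, int) and num_trucks >= 0, "argument passed to num_trucks parameter must be a non-negative integer"
--     return 2 * num_bicycles + 3 * num_tricycles + 4 * num_cars + 18 * num_trucks
-- ===== Notes on version B (the rewrite author's own statement) =====
-- stated objective: simpler
-- what changed: Replaced the nested dictionary plus two loops (building per-vehicle attribute dicts and multiplying all inner values) with a single closed-form weighted sum 2*b + 3*t + 4*c + 18*k; the assertions are kept unchanged.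
import Mathlib
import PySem

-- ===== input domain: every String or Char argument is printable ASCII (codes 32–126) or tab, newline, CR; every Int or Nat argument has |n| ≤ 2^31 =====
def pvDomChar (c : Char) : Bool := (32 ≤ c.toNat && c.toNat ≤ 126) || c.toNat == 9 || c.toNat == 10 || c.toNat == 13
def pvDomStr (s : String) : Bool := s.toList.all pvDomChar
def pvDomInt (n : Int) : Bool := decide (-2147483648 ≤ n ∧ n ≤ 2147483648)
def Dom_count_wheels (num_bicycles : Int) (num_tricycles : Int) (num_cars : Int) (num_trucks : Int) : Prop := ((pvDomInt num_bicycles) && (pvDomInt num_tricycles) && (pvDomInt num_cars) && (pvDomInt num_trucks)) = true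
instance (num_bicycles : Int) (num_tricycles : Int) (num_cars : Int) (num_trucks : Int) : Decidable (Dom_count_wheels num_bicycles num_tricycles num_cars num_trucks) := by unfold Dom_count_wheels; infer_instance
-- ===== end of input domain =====

-- B replaces A's nested dictionary and two loops with one closed-form weighted sum (simpler; same assertions, so Pre_ excludes the negative inputs on which A raises AssertionError).

-- ===== PORT A =====
-- A builds a dict of dicts, then for each vehicle multiplies all inner-dict values and sums.
def count_wheels (num_bicycles : Int) (num_tricycles : Int) (num_cars : Int) (num_trucks : Int) : Int :=
  -- the four assertions hold under Pre_count_wheels (A raises AssertionError otherwise)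
  let vehicles : PySem.Dict String (PySem.Dict String Int) :=
    PySem.Dict.ofList [
      ("bicycle",  PySem.Dict.ofList [("wheels", 2),  ("quantity", num_bicycles)]),
      ("tricycle", PySem.Dict.ofList [("wheels", 3),  ("quantity", num_tricycles)]),
      ("car",      PySem.Dict.ofList [("wheels", 4),  ("quantity", num_cars)]),
      ("truck",    PySem.Dict.ofList [("wheels", 18), ("quantity", num_trucks)])]
  vehicles.keys.foldl (fun total_wheels vehicle =>
    let inner := (vehicles.get? vehicle).getD PySem.Dict.empty
    let wheels := inner.keys.foldl (fun wheels attr =>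
      wheels * (inner.get? attr).getD 0) 1
    total_wheels + wheels) 0

-- ===== PORT B =====
def count_wheels_alt (num_bicycles : Int) (num_tricycles : Int) (num_cars : Int) (num_trucks : Int) : Int :=
  2 * num_bicycles + 3 * num_tricycles + 4 * num_cars + 18 * num_trucks

-- ===== PRECONDITION & SPEC =====
-- A raises AssertionError when any count is negative; Pre_ excludes exactly those inputs.
def Pre_count_wheels (num_bicycles : Int) (num_tricycles : Int) (num_cars : Int) (num_trucks : Int) : Prop :=
  0 ≤ num_bicycles ∧ 0 ≤ num_tricycles ∧ 0 ≤ num_cars ∧ 0 ≤ num_trucks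
instance (num_bicycles : Int) (num_tricycles : Int) (num_cars : Int) (num_trucks : Int) : Decidable (Pre_count_wheels num_bicycles num_tricycles num_cars num_trucks) := by unfold Pre_count_wheels; infer_instance
def pvWitness_count_wheels : Int × Int × Int × Int := (10, 1, 3, 2)
def Spec_count_wheels (num_bicycles : Int) (num_tricycles : Int) (num_cars : Int) (num_trucks : Int) (out : Int) : Prop := out = count_wheels_alt num_bicycles num_tricycles num_cars num_trucks
instance (num_bicycles : Int) (num_tricycles : Int) (num_cars : Int) (num_trucks : Int) (out : Int) : Decidable (Spec_count_wheels num_bicycles num_tricycles num_cars num_trucks out) := by unfold Spec_count_wheels; infer_instance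

-- ===== CLAIM (what is proved, stated in full; the proofs are below) =====
def Claim_equal_count_wheels : Prop := ∀ (num_bicycles : Int) (num_tricycles : Int) (num_cars : Int) (num_trucks : Int), Dom_count_wheels num_bicycles num_tricycles num_cars num_trucks → Pre_count_wheels num_bicycles num_tricycles num_cars num_trucks → Spec_count_wheels num_bicycles num_tricycles num_cars num_trucks (count_wheels num_bicycles num_tricycles num_cars num_trucks)

-- ===== LEMMAS AND PROOFS =====

-- ===== VERDICT (by name: the statement is the Claim_ definition above) =====
theorem count_wheels_spec : Claim_equal_count_wheels := by
  intro b t c k _ _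
  simp [Spec_count_wheels, count_wheels, count_wheels_alt, PySem.Dict.ofList,
        PySem.Dict.update, PySem.Dict.empty, PySem.Dict.keys, PySem.Dict.get?,
        PySem.Dict.insert, PySem.Dict.contains, List.foldl, List.find?]
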